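-- pv_equiv track=rewrite | github.com/Kawzeg/advent_of_code_2020 | aoc16/solve.py | constrain
-- ===== SOURCE A (Python) =====
-- import copy
--
-- def findSmallest(candidates):
--     smallest = list(candidates.items())[0]
--     for (k, v) in candidates.items():
--         if len(v) < len(smallest[1]):
--             smallest = (k,v)
--     return smallest
--
-- def removeFrom(candidates, num):
--     candidates = copy.deepcopy(candidates)
--     for v in candidates.values():
--         if num in v: v.remove(num)
--     return candidates
--
-- def constrain(candidates):
--     if len(candidates.items()) == 0:
--         return {}
--     smallest = findSmallest(candidates)
--     if len(smallest[1]) == 0: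
--         return None # Also unreachable if there is a solution
--     solution = {}
--     for possibility in smallest[1]:
--         solution[smallest[0]] = possibility
--         newCandidates = removeFrom(candidates, possibility)
--         del newCandidates[smallest[0]]
--         restSol = constrain(newCandidates)
--         if restSol is not None:
--             return {**solution, **restSol}
--     return None # Unreachable if there is a solution
-- ===== SOURCE B (Python) =====
-- def drop_first(v, p):
--     out = []
--     i = 0
--     while i < len(v):
--         if v[i] == p:
--             return out + v[i+1:]
--         out.append(v[i])
--         i += 1
--     return out
--
-- def constrain(candidates):
--     if not candidates:
--         return {}
--     k0, v0 = min(candidates.items(), key=lambda kv: len(kv[1]))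
--     stack = [([], k0, list(v0), candidates)]
--     while stack:
--         acc, key, pending, cands = stack.pop()
--         if not pending:
--             continue
--         p, rest = pending[0], pending[1:]
--         newc = {k: drop_first(v, p) for k, v in cands.items() if k != key}
--         acc2 = acc + [(key, p)]
--         if not newc:
--             return dict(acc2)
--         nk, nv = min(newc.items(), key=lambda kv: len(kv[1]))
--         stack.append((acc, key, rest, cands))
--         stack.append((acc2, nk, list(nv), newc))
--     return None
-- ===== Notes on version B (the rewrite author's own statement) =====
-- stated objective: alternative
-- what changed: The recursive backtracker (which deepcopies the whole candidate dict at every node, mutates it, and rebuilds the solution dict on the way back up) is replaced by an explicit-stack iterative backtracker: a while-loop over frames (partial assignment, chosen key, remaining possibilities, current candidates) that rebuilds each reduced candidate dict in a single comprehension pass, visits nodes in the same order and returns the identical first solution.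
import Mathlib
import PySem

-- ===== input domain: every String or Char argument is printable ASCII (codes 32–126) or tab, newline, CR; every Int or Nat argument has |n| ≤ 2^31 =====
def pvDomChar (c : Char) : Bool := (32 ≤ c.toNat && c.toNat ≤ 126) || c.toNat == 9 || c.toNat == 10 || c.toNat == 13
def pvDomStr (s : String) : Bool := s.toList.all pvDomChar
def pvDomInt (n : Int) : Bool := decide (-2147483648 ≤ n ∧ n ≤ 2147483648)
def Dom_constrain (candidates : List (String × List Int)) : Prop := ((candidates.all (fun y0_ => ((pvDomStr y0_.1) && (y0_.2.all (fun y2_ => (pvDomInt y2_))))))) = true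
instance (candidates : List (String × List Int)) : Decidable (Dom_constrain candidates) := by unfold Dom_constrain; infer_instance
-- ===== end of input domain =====

-- B replaces A's recursion (with a deepcopy of the whole dict at every node) by an
-- explicit-stack iterative backtracker that rebuilds each reduced dict in one pass;
-- same search order, same first solution (return value only; neither mutates its input).

-- ===== PORT A =====

-- for-loop over items, starting from items[0] (IndexError on an empty dict → none;
-- constrain only calls it on a nonempty dict)
def findSmallest (candidates : List (String × List Int)) : Option (String × List Int) :=
  match candidates with
  | [] => none
  | h :: t => some ((h :: t).foldl (fun s kv => if kv.2.length < s.2.length then kv else s) h)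

-- v.remove(num) guarded by `num in v` removes the first occurrence of num, which is
-- List.erase (PySem.List.remove?_eq_some_erase); deepcopy = value semantics, a no-op here
def removeFrom (candidates : List (String × List Int)) (num : Int) : List (String × List Int) :=
  candidates.map (fun kv => (kv.1, if num ∈ kv.2 then kv.2.erase num else kv.2))

-- termination helper for `constrain`, cited by its decreasing_by
theorem pv_foldSmall_mem (t : List (String × List Int)) (s : String × List Int) :
    t.foldl (fun s kv => if kv.2.length < s.2.length then kv else s) s ∈ s :: t := by
  induction t generalizing s with
  | nil => simp
  | cons kv t ih =>
    simp only [List.foldl_cons]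
    split
    · rcases List.mem_cons.1 (ih kv) with h | h <;> simp [h]
    · rcases List.mem_cons.1 (ih s) with h | h <;> simp [h]

-- `del newCandidates[smallest[0]]` removes the (single) entry with that key;
-- `{**solution, **restSol}` is (key, p) :: restSol since restSol's keys come from
-- newCandidates, from which the key was deleted
def constrain (candidates : List (String × List Int)) : Option (List (String × Int)) :=
  match candidates with
  | [] => some []
  | h :: t =>
    match _hfs : findSmallest (h :: t) with
    | none => none  -- unreachable: findSmallest is some on a nonempty dict
    | some smallest =>
      if smallest.2.length = 0 then none
      else
        smallest.2.findSome? (fun p =>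
          let newC := List.eraseP (fun kv => kv.1 == smallest.1) (removeFrom (h :: t) p)
          match constrain newC with
          | some rest => some ((smallest.1, p) :: rest)
          | none => none)
termination_by candidates.length
decreasing_by
  have h1 : findSmallest (h :: t)
      = some (t.foldl (fun s kv => if kv.2.length < s.2.length then kv else s) h) := by
    simp [findSmallest]
  rw [h1] at _hfs
  injection _hfs with hfs2
  have hsm : smallest ∈ h :: t := hfs2 ▸ pv_foldSmall_mem t h
  have hkv : ((smallest.1, if p ∈ smallest.2 then smallest.2.erase p else smallest.2) :
      String × List Int) ∈ removeFrom (h :: t) p := List.mem_map.2 ⟨smallest, hsm, rfl⟩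
  have h2 := List.length_eraseP_add_one (p := fun kv => kv.1 == smallest.1) hkv (by simp)
  have hlen : (removeFrom (h :: t) p).length = (h :: t).length := by simp [removeFrom]
  simp only [List.length_cons] at h2 hlen ⊢
  omega

-- ===== PORT B =====

-- drop_first: scan v left to right keeping a prefix accumulator `out`;
-- on the first element equal to p return out + v[i+1:]
def dropFirstGo (out : List Int) (v : List Int) (p : Int) : List Int :=
  match v with
  | [] => out
  | x :: xs => if x = p then out ++ xs else dropFirstGo (out ++ [x]) xs p

def dropFirst (v : List Int) (p : Int) : List Int := dropFirstGo [] v p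

-- {k: drop_first(v, p) for k, v in cands.items() if k != key}
def reduceCands (cands : List (String × List Int)) (key : String) (p : Int) : List (String × List Int) :=
  (cands.filter (fun kv => kv.1 != key)).map (fun kv => (kv.1, dropFirst kv.2 p))

-- fuel for the loop below, a totality guard only: the Python while-loop needs none;
-- pvFuel is proved sufficient below (pv_costT_le_bound)
def pvFuel (candidates : List (String × List Int)) : Nat :=
  (candidates.foldl (fun a kv => max a kv.2.length) 0 + 2) ^ (candidates.length + 1)

-- the while-loop over the explicit stack; a frame is (acc, key, pending, cands);
-- Python's `if not newc` test is min? = none (PySem.List.min?_eq_none_iff)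
def loopB : Nat → List (List (String × Int) × String × List Int × List (String × List Int)) →
    Option (List (String × Int))
  | _, [] => none
  | 0, _ :: _ => none  -- fuel exhausted (never happens with pvFuel, proved below)
  | fuel+1, (acc, key, pending, cands) :: stack =>
    match pending with
    | [] => loopB fuel stack
    | p :: ps =>
      let newc := reduceCands cands key p
      let acc2 := acc ++ [(key, p)]
      match PySem.List.min? newc (fun kv => kv.2.length) with
      | none => some acc2
      | some (nk, nv) =>
        loopB fuel ((acc2, nk, nv, newc) :: (acc, key, ps, cands) :: stack)

def constrain_alt (candidates : List (String × List Int)) : Option (List (String × Int)) :=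
  match PySem.List.min? candidates (fun kv => kv.2.length) with
  | none => some []  -- `if not candidates: return {}`
  | some (k0, v0) => loopB (pvFuel candidates) [([], k0, v0, candidates)]

-- ===== PRECONDITION & SPEC =====
-- Pre_ excludes association lists with duplicate keys: they do not represent a Python
-- dict (whose keys are unique), so neither port's value on them corresponds to a run of
-- the Python function.
def Pre_constrain (candidates : List (String × List Int)) : Prop :=
  (candidates.map Prod.fst).Nodup
instance (candidates : List (String × List Int)) : Decidable (Pre_constrain candidates) := by
  unfold Pre_constrain; infer_instance

def pvWitness_constrain : (List (String × List Int)) := [("a", [1, 2]), ("b", [1])]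

def Spec_constrain (candidates : List (String × List Int)) (out : Option (List (String × Int))) : Prop := out = constrain_alt candidates
instance (candidates : List (String × List Int)) (out : Option (List (String × Int))) : Decidable (Spec_constrain candidates out) := by unfold Spec_constrain; infer_instance

-- ===== CLAIM (what is proved, stated in full; the proofs are below) =====
def Claim_equal_constrain : Prop := ∀ (candidates : List (String × List Int)), Dom_constrain candidates → Pre_constrain candidates → Spec_constrain candidates (constrain candidates)

-- ===== LEMMAS AND PROOFS =====

-- A's one-key "try the possibilities" loop, named for the induction
def aTry (cands : List (String × List Int)) (key : String) (pending : List Int) :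
    Option (List (String × Int)) :=
  pending.findSome? (fun p =>
    match constrain (List.eraseP (fun kv => kv.1 == key) (removeFrom cands p)) with
    | some rest => some ((key, p) :: rest)
    | none => none)

-- exact fuel consumed by loopB to exhaust one frame (d bounds cands.length)
def costT : Nat → List (String × List Int) → String → List Int → Nat
  | _, _, _, [] => 1
  | 0, _, _, _ :: _ => 0
  | d+1, c, key, p :: ps =>
    let newc := reduceCands c key p
    1 + (match PySem.List.min? newc (fun kv => kv.2.length) with
         | none => 0
         | some (nk, nv) => costT d newc nk nv)
      + costT (d+1) c key ps
termination_by d _ _ pending => (d, pending.length)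

theorem pv_dropFirstGo_eq (v out : List Int) (p : Int) :
    dropFirstGo out v p = out ++ v.erase p := by
  induction v generalizing out with
  | nil => simp [dropFirstGo]
  | cons x xs ih =>
    by_cases hx : x = p
    · simp [dropFirstGo, hx, List.erase_cons_head]
    · simp [dropFirstGo, hx, ih]

theorem pv_dropFirst_eq (v : List Int) (p : Int) : dropFirst v p = v.erase p := by
  simp [dropFirst, pv_dropFirstGo_eq]

theorem pv_ite_erase (v : List Int) (p : Int) :
    (if p ∈ v then v.erase p else v) = v.erase p := by
  split
  · rfl
  · exact (List.erase_of_not_mem (by assumption)).symm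

theorem pv_removeFrom_eq (c : List (String × List Int)) (p : Int) :
    removeFrom c p = c.map (fun kv => (kv.1, kv.2.erase p)) := by
  simp only [removeFrom]
  exact List.map_congr_left (fun kv _ => by rw [pv_ite_erase])

theorem pv_reduce_simple (c : List (String × List Int)) (key : String) (p : Int) :
    reduceCands c key p = (c.filter (fun kv => kv.1 != key)).map (fun kv => (kv.1, kv.2.erase p)) := by
  simp only [reduceCands]
  exact List.map_congr_left (fun kv _ => by rw [pv_dropFirst_eq])

theorem pv_reduce_eq (c : List (String × List Int)) (key : String) (p : Int)
    (hnd : (c.map Prod.fst).Nodup) :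
    reduceCands c key p = List.eraseP (fun kv => kv.1 == key) (removeFrom c p) := by
  rw [pv_reduce_simple, pv_removeFrom_eq]
  induction c with
  | nil => rfl
  | cons kv c ih =>
    simp only [List.map_cons, List.nodup_cons, List.mem_map] at hnd
    by_cases hk : kv.1 = key
    · rw [List.filter_cons_of_neg (by simp [hk])]
      simp only [List.map_cons]
      rw [List.eraseP_cons_of_pos (by simp [hk])]
      rw [List.filter_eq_self.2 (fun a ha => by
        simp only [bne_iff_ne, ne_eq]
        intro he
        exact hnd.1 ⟨a, ha, by rw [he, hk]⟩)]
    · rw [List.filter_cons_of_pos (by simp [hk])]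
      simp only [List.map_cons]
      rw [List.eraseP_cons_of_neg (by simp [hk])]
      exact congrArg _ (ih hnd.2)

theorem pv_reduce_fsts (c : List (String × List Int)) (key : String) (p : Int) :
    (reduceCands c key p).map Prod.fst = (c.map Prod.fst).filter (fun s => s != key) := by
  induction c with
  | nil => rfl
  | cons kv c ih =>
    simp only [reduceCands, List.filter_cons, List.map_cons] at *
    cases kv.1 != key <;> simp [ih]

theorem pv_reduce_nodup (c : List (String × List Int)) (key : String) (p : Int)
    (hnd : (c.map Prod.fst).Nodup) : ((reduceCands c key p).map Prod.fst).Nodup := by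
  rw [pv_reduce_fsts]; exact hnd.filter _

theorem pv_reduce_len_lt (c : List (String × List Int)) (key : String) (p : Int)
    (hkey : key ∈ c.map Prod.fst) : (reduceCands c key p).length < c.length := by
  have h1 : (reduceCands c key p).length = ((reduceCands c key p).map Prod.fst).length := by
    rw [List.length_map]
  rw [h1, pv_reduce_fsts]
  have h2 : ((c.map Prod.fst).filter (fun s => s != key)).length < (c.map Prod.fst).length :=
    List.length_filter_lt_length_iff_exists.2 ⟨key, hkey, by simp⟩
  simpa using h2

theorem pv_reduce_val_le (c : List (String × List Int)) (key : String) (p : Int) (V : Nat)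
    (hv : ∀ kv ∈ c, kv.2.length ≤ V) : ∀ kv ∈ reduceCands c key p, kv.2.length ≤ V := by
  intro kv hkv
  rw [pv_reduce_simple] at hkv
  rcases List.mem_map.1 hkv with ⟨kv', hkv', rfl⟩
  have : kv' ∈ c := List.mem_of_mem_filter hkv'
  exact le_trans (List.length_erase_le) (hv kv' this)

def pvMinStep (acc : Option (String × List Int)) (x : String × List Int) :
    Option (String × List Int) :=
  match acc with
  | none => some x
  | some m => if x.2.length < m.2.length then some x else some m

theorem pv_min?_eq_foldg (xs : List (String × List Int)) :
    PySem.List.min? xs (fun kv => kv.2.length) = xs.foldl pvMinStep none := by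
  unfold PySem.List.min?
  congr 1
  funext acc x
  cases acc <;> rfl

theorem pv_min?_aux (t : List (String × List Int)) (s : String × List Int) :
    List.foldl pvMinStep (some s) t
      = some (t.foldl (fun s kv => if kv.2.length < s.2.length then kv else s) s) := by
  induction t generalizing s with
  | nil => rfl
  | cons x t ih =>
    simp only [List.foldl_cons, pvMinStep]
    split <;> rw [ih]

theorem pv_min?_cons_foldl (h : String × List Int) (t : List (String × List Int)) :
    PySem.List.min? (h :: t) (fun kv => kv.2.length)
      = some ((h :: t).foldl (fun s kv => if kv.2.length < s.2.length then kv else s) h) := by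
  rw [pv_min?_eq_foldg, List.foldl_cons]
  show List.foldl pvMinStep (some h) t = _
  rw [pv_min?_aux t h, List.foldl_cons, ite_self]

theorem pv_constrain_eq_aTry (c : List (String × List Int)) (k : String) (v : List Int)
    (hmin : PySem.List.min? c (fun kv => kv.2.length) = some (k, v)) :
    constrain c = aTry c k v := by
  match c with
  | [] => simp [PySem.List.min?] at hmin
  | h :: t =>
    rw [pv_min?_cons_foldl] at hmin
    have hfold : (h :: t).foldl (fun s kv => if kv.2.length < s.2.length then kv else s) h
        = (k, v) := by injection hmin
    rw [constrain]
    have hfs : findSmallest (h :: t) = some (k, v) := by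
      simp only [findSmallest, hfold]
    rw [hfs]
    by_cases hz : v.length = 0
    · have : v = [] := List.length_eq_zero_iff.1 hz
      simp [this, aTry]
    · simp only [if_neg hz, aTry]

theorem pv_costT_le_bound (d : Nat) : ∀ (c : List (String × List Int)) (key : String)
    (pending : List Int) (V : Nat), (∀ kv ∈ c, kv.2.length ≤ V) →
    costT d c key pending ≤ (pending.length + 1) * (V + 2) ^ d := by
  induction d with
  | zero =>
    intro c key pending V hv
    cases pending with
    | nil => simp [costT]
    | cons p ps => simp [costT]
  | succ d ihd =>
    intro c key pending V hv
    induction pending with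
    | nil =>
      simpa [costT] using Nat.one_le_pow (d+1) (V+2) (by omega)
    | cons p ps ihp =>
      rw [costT]
      have hA : 1 ≤ (V + 2) ^ d := Nat.one_le_pow _ _ (by omega)
      have hM : (match PySem.List.min? (reduceCands c key p) (fun kv => kv.2.length) with
          | none => 0
          | some (nk, nv) => costT d (reduceCands c key p) nk nv) ≤ (V + 1) * (V + 2) ^ d := by
        cases hm : PySem.List.min? (reduceCands c key p) (fun kv => kv.2.length) with
        | none => simp
        | some kv =>
          obtain ⟨nk, nv⟩ := kv
          have hv' := pv_reduce_val_le c key p V hv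
          have hnv : nv.length ≤ V := hv' (nk, nv) (PySem.List.min?_mem hm)
          calc costT d (reduceCands c key p) nk nv
              ≤ (nv.length + 1) * (V + 2) ^ d := ihd _ nk nv V hv'
            _ ≤ (V + 1) * (V + 2) ^ d := Nat.mul_le_mul_right _ (by omega)
      have hT := ihp
      have hpow : (V + 2) ^ (d + 1) = (V + 2) ^ d * (V + 2) := pow_succ _ _
      simp only [List.length_cons]
      nlinarith [hM, hT, hA, hpow]

theorem pv_loop_eq (d : Nat) : ∀ (c : List (String × List Int)), c.length ≤ d →
    ∀ (key : String) (pending : List Int) acc stack X,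
    (c.map Prod.fst).Nodup → key ∈ c.map Prod.fst →
    loopB (X + costT d c key pending) ((acc, key, pending, c) :: stack)
      = match aTry c key pending with
        | some r => some (acc ++ r)
        | none => loopB X stack := by
  induction d with
  | zero =>
    intro c hlen key pending acc stack X hnd hkey
    have : c = [] := List.length_eq_zero_iff.1 (Nat.le_zero.1 hlen)
    subst this
    simp at hkey
  | succ d ihd =>
    intro c hlen key pending acc stack X hnd hkey
    induction pending generalizing acc stack X with
    | nil =>
      simp [costT, loopB, aTry]
    | cons p ps ihp =>
      have hred := pv_reduce_eq c key p hnd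
      cases hm : PySem.List.min? (reduceCands c key p) (fun kv => kv.2.length) with
      | none =>
        have hnewc : reduceCands c key p = [] := (PySem.List.min?_eq_none_iff _ _).1 hm
        have hcost : costT (d+1) c key (p :: ps)
            = (costT (d+1) c key ps) + 1 := by
          rw [costT]
          simp only [hm]
          omega
        have hfuel : X + costT (d+1) c key (p :: ps)
            = (X + costT (d+1) c key ps) + 1 := by omega
        rw [hfuel]
        simp only [loopB, hm]
        have hconstr : constrain (List.eraseP (fun kv => kv.1 == key) (removeFrom c p))
            = some [] := by rw [← hred, hnewc]; simp [constrain]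
        simp [aTry, hconstr]
      | some nkv =>
        obtain ⟨nk, nv⟩ := nkv
        have hcost : costT (d+1) c key (p :: ps)
            = (costT (d+1) c key ps + costT d (reduceCands c key p) nk nv) + 1 := by
          rw [costT]
          simp only [hm]
          omega
        have hfuel : X + costT (d+1) c key (p :: ps)
            = ((X + costT (d+1) c key ps) + costT d (reduceCands c key p) nk nv) + 1 := by
          omega
        rw [hfuel]
        simp only [loopB, hm]
        have hmem : (nk, nv) ∈ reduceCands c key p := PySem.List.min?_mem hm
        have hlt : (reduceCands c key p).length < c.length := pv_reduce_len_lt c key p hkey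
        have hIH := ihd (reduceCands c key p) (by omega) nk nv
          (acc ++ [(key, p)]) ((acc, key, ps, c) :: stack) (X + costT (d+1) c key ps)
          (pv_reduce_nodup c key p hnd) (List.mem_map.2 ⟨(nk, nv), hmem, rfl⟩)
        rw [hIH]
        have hconstr : constrain (List.eraseP (fun kv => kv.1 == key) (removeFrom c p))
            = aTry (reduceCands c key p) nk nv := by
          rw [← hred]
          exact pv_constrain_eq_aTry _ _ _ hm
        cases ha : aTry (reduceCands c key p) nk nv with
        | some r =>
          have hstep : aTry c key (p :: ps) = some ((key, p) :: r) := by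
            simp only [aTry, List.findSome?_cons]
            rw [hconstr, ha]
          rw [hstep]
          simp
        | none =>
          have hstep : aTry c key (p :: ps) = aTry c key ps := by
            simp only [aTry, List.findSome?_cons]
            rw [hconstr, ha]
          rw [hstep]
          show loopB (X + costT (d+1) c key ps) ((acc, key, ps, c) :: stack)
            = match aTry c key ps with
              | some r => some (acc ++ r)
              | none => loopB X stack
          exact ihp acc stack X

-- ===== VERDICT (by name: the statement is the Claim_ definition above) =====
theorem constrain_spec : Claim_equal_constrain := by
  intro candidates _hdom hpre
  unfold Spec_constrain
  unfold Pre_constrain at hpre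
  cases hm : PySem.List.min? candidates (fun kv => kv.2.length) with
  | none =>
    have hnil : candidates = [] := (PySem.List.min?_eq_none_iff _ _).1 hm
    subst hnil
    rw [constrain, constrain_alt]
    rw [hm]
  | some kv =>
    obtain ⟨k0, v0⟩ := kv
    have hmem := PySem.List.min?_mem hm
    have hkey : k0 ∈ candidates.map Prod.fst := List.mem_map.2 ⟨(k0, v0), hmem, rfl⟩
    have hc : constrain candidates = aTry candidates k0 v0 := pv_constrain_eq_aTry _ _ _ hm
    have halt : constrain_alt candidates
        = loopB (pvFuel candidates) [([], k0, v0, candidates)] := by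
      rw [constrain_alt, hm]
    have hV : ∀ kv ∈ candidates, kv.2.length ≤
        candidates.foldl (fun a kv => max a kv.2.length) 0 :=
      (PySem.List.le_foldl_max_nat candidates (fun kv => kv.2.length) 0).2
    have hv0 : v0.length ≤ candidates.foldl (fun a kv => max a kv.2.length) 0 := hV _ hmem
    have hb := pv_costT_le_bound candidates.length candidates k0 v0
      (candidates.foldl (fun a kv => max a kv.2.length) 0) hV
    have hfuel : costT candidates.length candidates k0 v0 ≤ pvFuel candidates := by
      have h2 : (v0.length + 1) * (candidates.foldl (fun a kv => max a kv.2.length) 0 + 2)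
            ^ candidates.length ≤ pvFuel candidates := by
        rw [pvFuel, pow_succ']
        exact Nat.mul_le_mul_right _ (by omega)
      exact le_trans hb h2
    obtain ⟨X, hX⟩ : ∃ X, pvFuel candidates = X + costT candidates.length candidates k0 v0 :=
      ⟨pvFuel candidates - costT candidates.length candidates k0 v0, by omega⟩
    rw [halt, hX]
    rw [pv_loop_eq candidates.length candidates (le_refl _) k0 v0 [] [] X hpre hkey]
    rw [hc]
    cases h2 : aTry candidates k0 v0 with
    | some r => simp
    | none => rw [loopB]
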